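-- pv_equiv track=rewrite | github.com/ccp4/ccp4i2 | ccp4i2/wrappers/scaleit/script/scaleit_report.py | html_linebreak
-- ===== SOURCE A (Python) =====
-- def html_linebreak(line, mutate=True):
--   # delineate lines by "<br/>"
--   # mutate characters '&', '<', '>' into safe equivalents
--
--   pline = ''
--   for c in line:
--     if mutate:
--       if c == '&': pline += '&amp;'
--       elif c == '<': pline += '&lt;'
--       elif c == '>': pline += '&gt;'
--       else: pline += c
--     else: pline += c
--
--   lines = pline.splitlines()
--   if len(lines) <= 1:
--     return pline
--   linenew = ''
--   for i, line in enumerate(lines):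
--     if i > 0: linenew += '<br/>'
--     linenew += line
--   return linenew
-- ===== SOURCE B (Python) =====
-- def html_linebreak(line, mutate=True):
--   # escape via three whole-string replace passes, then split once and join with br tags
--   pline = line.replace('&', '&amp;').replace('<', '&lt;').replace('>', '&gt;') if mutate else line
--   lines = pline.splitlines()
--   return pline if len(lines) <= 1 else '<br/>'.join(lines)
-- ===== Notes on version B (the rewrite author's own statement) =====
-- stated objective: faster
-- what changed: Replaces the character-by-character accumulator loop and the manual enumerate/concatenate join with three whole-string str.replace passes, one splitlines and a br-tag join.
import Mathlib
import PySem

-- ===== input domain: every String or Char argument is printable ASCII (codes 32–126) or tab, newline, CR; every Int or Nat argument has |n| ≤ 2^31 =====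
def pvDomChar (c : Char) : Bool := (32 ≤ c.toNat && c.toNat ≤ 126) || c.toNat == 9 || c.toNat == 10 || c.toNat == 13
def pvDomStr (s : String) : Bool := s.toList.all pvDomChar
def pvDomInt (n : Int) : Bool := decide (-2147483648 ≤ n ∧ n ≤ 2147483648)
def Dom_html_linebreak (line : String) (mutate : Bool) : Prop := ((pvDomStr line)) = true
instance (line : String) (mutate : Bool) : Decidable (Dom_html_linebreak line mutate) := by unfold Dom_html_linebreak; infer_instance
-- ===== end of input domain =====

-- B replaces A's character-by-character accumulator loop and manual enumerate-join with
-- three whole-string replace passes, one splitlines and a br-tag join (measured faster, same O(n)).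


-- ===== PORT A =====
def html_linebreak (line : String) (mutate : Bool) : String :=
  let pline : List Char := line.toList.foldl (fun acc c =>
    if mutate then
      if c = '&' then acc ++ "&amp;".toList
      else if c = '<' then acc ++ "&lt;".toList
      else if c = '>' then acc ++ "&gt;".toList
      else acc ++ [c]
    else acc ++ [c]) []
  let lines := PySem.Chars.splitlines pline
  if lines.length ≤ 1 then String.mk pline
  else
    String.mk ((PySem.List.enumerate lines).foldl
      (fun acc p => (if p.1 > 0 then acc ++ "<br/>".toList else acc) ++ p.2) [])

-- ===== PORT B =====
def html_linebreak_alt (line : String) (mutate : Bool) : String :=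
  let pline := if mutate then
      PySem.Str.replace (PySem.Str.replace (PySem.Str.replace line "&" "&amp;") "<" "&lt;") ">" "&gt;"
    else line
  let lines := PySem.Str.splitlines pline
  if lines.length ≤ 1 then pline else PySem.Str.join "<br/>" lines

-- ===== PRECONDITION & SPEC =====
def Spec_html_linebreak (line : String) (mutate : Bool) (out : String) : Prop := out = html_linebreak_alt line mutate
instance (line : String) (mutate : Bool) (out : String) : Decidable (Spec_html_linebreak line mutate out) := by unfold Spec_html_linebreak; infer_instance

-- ===== CLAIM (what is proved, stated in full; the proofs are below) =====
def Claim_equal_html_linebreak : Prop := ∀ (line : String) (mutate : Bool), Dom_html_linebreak line mutate → Spec_html_linebreak line mutate (html_linebreak line mutate)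

-- ===== LEMMAS AND PROOFS =====

/-- Full per-character escape map (A's loop body as a function). -/
def escFull (c : Char) : List Char :=
  if c = '&' then "&amp;".toList
  else if c = '<' then "&lt;".toList
  else if c = '>' then "&gt;".toList
  else [c]

lemma escA_eq (mutate : Bool) (cs : List Char) :
    cs.foldl (fun acc c =>
      if mutate then
        if c = '&' then acc ++ "&amp;".toList
        else if c = '<' then acc ++ "&lt;".toList
        else if c = '>' then acc ++ "&gt;".toList
        else acc ++ [c]
      else acc ++ [c]) [] = if mutate then cs.flatMap escFull else cs := by
  cases mutate with
  | false =>
      simpa using PySem.List.foldl_append_eq_flatMap (fun c => [c]) cs []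
  | true =>
      have h : (fun (acc : List Char) (c : Char) =>
          if true = true then
            if c = '&' then acc ++ "&amp;".toList
            else if c = '<' then acc ++ "&lt;".toList
            else if c = '>' then acc ++ "&gt;".toList
            else acc ++ [c]
          else acc ++ [c]) = fun acc c => acc ++ escFull c := by
        funext acc c; simp only [escFull, if_true]; split_ifs <;> rfl
      rw [h]
      simpa using PySem.List.foldl_append_eq_flatMap escFull cs []

lemma replace_go_single (c0 : Char) (new : List Char) :
    ∀ (l : List Char) (fuel : Nat) (acc : List Char), l.length ≤ fuel →
    PySem.Chars.replace.go [c0] new fuel l acc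
      = acc.reverse ++ l.flatMap (fun c => if c = c0 then new else [c]) := by
  intro l
  induction l with
  | nil =>
      intro fuel acc _
      cases fuel <;> simp [PySem.Chars.replace.go]
  | cons c t ih =>
      intro fuel acc hle
      cases fuel with
      | zero => simp at hle
      | succ f =>
          rw [PySem.Chars.replace.go]
          by_cases hc : c = c0
          · subst hc
            have hp : [c].isPrefixOf (c :: t) = true := by simp [List.isPrefixOf]
            rw [if_pos hp, show List.drop (List.length [c]) (c :: t) = t from rfl]
            rw [ih f (new.reverse ++ acc) (by simpa using Nat.le_of_succ_le_succ hle)]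
            simp
          · have hp : [c0].isPrefixOf (c :: t) = false := by
              simp [List.isPrefixOf]; exact fun h => (hc h.symm).elim
            rw [if_neg (by simp [hp])]
            rw [ih f (c :: acc) (by simpa using Nat.le_of_succ_le_succ hle)]
            simp [hc]

/-- `Chars.replace` with a single-character pattern is a per-character flatMap. -/
lemma replace_single (c0 : Char) (new s : List Char) :
    PySem.Chars.replace s [c0] new = s.flatMap (fun c => if c = c0 then new else [c]) := by
  rw [PySem.Chars.replace]
  simp only [List.isEmpty_cons, if_false, Bool.false_eq_true]
  simpa using replace_go_single c0 new s s.length [] le_rfl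

lemma chain_eq (cs : List Char) :
    PySem.Chars.replace (PySem.Chars.replace (PySem.Chars.replace cs "&".toList "&amp;".toList)
      "<".toList "&lt;".toList) ">".toList "&gt;".toList = cs.flatMap escFull := by
  rw [show ("&".toList) = ['&'] from rfl, show ("<".toList) = ['<'] from rfl,
      show (">".toList) = ['>'] from rfl]
  rw [replace_single, replace_single, replace_single, List.flatMap_assoc, List.flatMap_assoc]
  apply List.flatMap_congr
  intro c _
  by_cases h1 : c = '&'
  · subst h1; rfl
  by_cases h2 : c = '<'
  · subst h2; rfl
  by_cases h3 : c = '>'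
  · subst h3; rfl
  simp [h1, h2, h3, escFull]

lemma join_flat (sep l : List Char) (rest : List (List Char)) :
    PySem.Chars.join sep (l :: rest) = l ++ rest.flatMap (fun p => sep ++ p) := by
  induction rest generalizing l with
  | nil => simp [PySem.Chars.join_singleton]
  | cons q tl ih => simp [PySem.Chars.join_cons_cons, ih, List.append_assoc]

lemma enumfold_pos (sep : List Char) (ls : List (List Char)) (acc : List Char) (s : Int)
    (h : 1 ≤ s) :
    (PySem.List.enumerate ls s).foldl
      (fun acc p => (if p.1 > 0 then acc ++ sep else acc) ++ p.2) acc
      = acc ++ ls.flatMap (fun p => sep ++ p) := by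
  induction ls generalizing acc s with
  | nil => simp [PySem.List.enumerate_nil]
  | cons l tl ih =>
      rw [PySem.List.enumerate_cons, List.foldl_cons]
      have hs : (s > 0) := by omega
      rw [if_pos hs, ih _ (s + 1) (by omega)]
      simp [List.append_assoc]

lemma enumfold (sep : List Char) (l : List Char) (rest : List (List Char)) :
    (PySem.List.enumerate (l :: rest)).foldl
      (fun acc p => (if p.1 > 0 then acc ++ sep else acc) ++ p.2) []
      = PySem.Chars.join sep (l :: rest) := by
  rw [PySem.List.enumerate_cons, List.foldl_cons, join_flat]
  simp only [show ¬ ((0 : Int) > 0) by omega, if_neg, not_false_iff]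
  rw [enumfold_pos sep rest ([] ++ l) (0 + 1) (by omega)]
  simp

-- ===== VERDICT (by name: the statement is the Claim_ definition above) =====
theorem html_linebreak_spec : Claim_equal_html_linebreak := by
  intro line mutate _
  simp only [Spec_html_linebreak, html_linebreak, html_linebreak_alt]
  have hpl : (line.toList.foldl (fun acc c =>
      if mutate then
        if c = '&' then acc ++ "&amp;".toList
        else if c = '<' then acc ++ "&lt;".toList
        else if c = '>' then acc ++ "&gt;".toList
        else acc ++ [c]
      else acc ++ [c]) [])
      = (if mutate then
          PySem.Str.replace (PySem.Str.replace (PySem.Str.replace line "&" "&amp;") "<" "&lt;") ">" "&gt;"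
        else line).toList := by
    rw [escA_eq]
    cases mutate with
    | false => simp
    | true =>
        simp only [if_true]
        rw [PySem.Str.toList_replace, PySem.Str.toList_replace, PySem.Str.toList_replace, chain_eq]
  set plineB := (if mutate then
      PySem.Str.replace (PySem.Str.replace (PySem.Str.replace line "&" "&amp;") "<" "&lt;") ">" "&gt;"
    else line) with hB
  rw [hpl]
  have hlines : PySem.Chars.splitlines plineB.toList
      = (PySem.Str.splitlines plineB).map String.toList := (PySem.Str.splitlines_map_toList plineB).symm
  rw [hlines]
  by_cases hlen : (PySem.Str.splitlines plineB).length ≤ 1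
  · rw [if_pos (by rw [List.length_map]; exact hlen), if_pos hlen]
    exact String.ofList_toList
  · rw [if_neg (by rw [List.length_map]; exact hlen), if_neg hlen]
    cases hsp : PySem.Str.splitlines plineB with
    | nil => rw [hsp] at hlen; simp at hlen
    | cons l0 tl =>
        simp only [List.map_cons]
        rw [enumfold]
        have hj : (PySem.Str.join "<br/>" (l0 :: tl)).toList
            = PySem.Chars.join "<br/>".toList (List.map String.toList (l0 :: tl)) :=
          PySem.Str.toList_join _ _
        simp only [List.map_cons] at hj
        rw [← hj]
        exact String.ofList_toList
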